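-- pv_equiv track=rewrite | github.com/a-brandon/practice | edabit/movie_theater_seating.py | group_seats
-- ===== SOURCE A (Python) =====
-- def group_seats(lst, n):
--     seats = [*sum(lst, [])]
--     zeros = [i for i, x in enumerate(seats) if x == 0]
--     avail_seats = 0
--     for i, _ in enumerate(zeros[:-n + 1]):
--         placements, counter = zeros[i:i + n], 0
--         if all(placements[j] + 1 == placements[j + 1] or placements[j + 1] - 1 ==
--                placements[j] for j, _ in enumerate(placements[:-1])):
--             avail_seats += 1
--     return avail_seats
-- ===== SOURCE B (Python) =====
-- def group_seats(lst, n):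
--     # One pass over the seats: track the current run of consecutive empty
--     # seats; a run of length r contributes r - n + 1 windows when r >= n.
--     total = 0
--     run = 0
--     for row in lst:
--         for x in row:
--             if x == 0:
--                 run += 1
--             else:
--                 if run >= n:
--                     total += run - n + 1
--                 run = 0
--     if run >= n:
--         total += run - n + 1
--     return total
-- ===== Notes on version B (the rewrite author's own statement) =====
-- stated objective: faster
-- what changed: B makes one pass over the seats tracking the length of the current run of consecutive empty seats and adds run-n+1 per finished run, instead of A's pass that builds the list of zero indices and then checks pairwise adjacency inside every length-n window of that list.
-- intended difference: For n = 1 with at least one empty seat, A returns 0 (its loop runs over zeros[:-n+1] = zeros[:0], an empty slice) while B returns the number of empty seats, the intended count of single-seat windows. — e.g. on group_seats([[0]], 1): A returns 0, B returns 1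
-- outside the precondition, e.g. on group_seats([[0, 0]], 0): A returns 1, B returns 3
import Mathlib
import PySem

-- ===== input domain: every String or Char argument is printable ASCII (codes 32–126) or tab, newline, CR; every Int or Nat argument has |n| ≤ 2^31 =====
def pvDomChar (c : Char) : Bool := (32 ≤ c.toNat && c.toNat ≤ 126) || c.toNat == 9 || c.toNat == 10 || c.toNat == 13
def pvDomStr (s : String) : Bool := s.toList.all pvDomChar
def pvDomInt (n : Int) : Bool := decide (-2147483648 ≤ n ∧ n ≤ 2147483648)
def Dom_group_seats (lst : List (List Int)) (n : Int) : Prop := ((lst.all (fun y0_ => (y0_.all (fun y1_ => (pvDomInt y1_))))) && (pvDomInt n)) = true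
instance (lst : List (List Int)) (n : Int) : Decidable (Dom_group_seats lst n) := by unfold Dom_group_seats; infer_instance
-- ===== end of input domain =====

-- B: one pass over the seats summing run-n+1 per maximal run of empty seats, replacing
-- A's window-by-window adjacency scan of the zero-index list; B also returns the intended
-- count (the number of empty seats) for n = 1, where A returns 0.


-- ===== PORT A =====
def group_seats (lst : List (List Int)) (n : Int) : Int :=
  let seats := lst.flatten
  let zeros := (PySem.List.enumerate seats).filterMap (fun p => if p.2 = 0 then some p.1 else none)
  (PySem.List.enumerate (PySem.List.slice zeros none (some (-n + 1)))).foldl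
    (fun avail_seats p =>
      let placements := PySem.List.slice zeros (some p.1) (some (p.1 + n))
      if (PySem.List.enumerate (PySem.List.slice placements none (some (-1)))).all
          (fun q => (PySem.List.pyGetD placements q.1 0 + 1 == PySem.List.pyGetD placements (q.1 + 1) 0)
            || (PySem.List.pyGetD placements (q.1 + 1) 0 - 1 == PySem.List.pyGetD placements q.1 0))
      then avail_seats + 1 else avail_seats)
    0

-- ===== PORT B =====
def group_seats_alt (lst : List (List Int)) (n : Int) : Int :=
  let st := lst.foldl (fun s row =>
      row.foldl (fun tr x =>
        if x = 0 then (tr.1, tr.2 + 1)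
        else if n ≤ tr.2 then (tr.1 + tr.2 - n + 1, 0) else (tr.1, 0)) s)
    ((0 : Int), (0 : Int))
  if n ≤ st.2 then st.1 + st.2 - n + 1 else st.1

-- ===== PRECONDITION & SPEC =====
-- Pre_ restricts to group sizes n ≥ 1, the natural domain of the task; for n ≤ 0 the value A
-- returns (min(len(zeros), 1 - n), from the empty placements slice) is an accident of slicing.
def Pre_group_seats (lst : List (List Int)) (n : Int) : Prop := 1 ≤ n
instance (lst : List (List Int)) (n : Int) : Decidable (Pre_group_seats lst n) := by unfold Pre_group_seats; infer_instance
def pvWitness_group_seats : List (List Int) × Int := ([[0, 1, 0, 0]], 2)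

-- For n = 1 with at least one empty seat, A returns 0 (its loop runs over zeros[:-n+1] =
-- zeros[:0], an empty slice) while B returns the number of empty seats, the intended count
-- of single-seat windows.
def D_group_seats (lst : List (List Int)) (n : Int) : Prop := n = 1 ∧ lst.any (fun row => row.any (fun x => x == 0)) = true
instance (lst : List (List Int)) (n : Int) : Decidable (D_group_seats lst n) := by unfold D_group_seats; infer_instance

def Spec_group_seats (lst : List (List Int)) (n : Int) (out : Int) : Prop := ¬ D_group_seats lst n → out = group_seats_alt lst n
instance (lst : List (List Int)) (n : Int) (out : Int) : Decidable (Spec_group_seats lst n out) := by unfold Spec_group_seats; infer_instance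

def pvDiffWitness_group_seats : List (List Int) × Int := ([[0]], 1)
def pvDiffWitnessOut_group_seats : Int × Int := (0, 1)

-- ===== CLAIM (what is proved, stated in full; the proofs are below) =====
def Claim_unchanged_group_seats : Prop := ∀ (lst : List (List Int)) (n : Int), Dom_group_seats lst n → Pre_group_seats lst n → Spec_group_seats lst n (group_seats lst n)
def Claim_changed_group_seats : Prop := Dom_group_seats (pvDiffWitness_group_seats.1) (pvDiffWitness_group_seats.2) ∧ Pre_group_seats (pvDiffWitness_group_seats.1) (pvDiffWitness_group_seats.2) ∧ D_group_seats (pvDiffWitness_group_seats.1) (pvDiffWitness_group_seats.2) ∧ group_seats (pvDiffWitness_group_seats.1) (pvDiffWitness_group_seats.2) = pvDiffWitnessOut_group_seats.1 ∧ group_seats_alt (pvDiffWitness_group_seats.1) (pvDiffWitness_group_seats.2) = pvDiffWitnessOut_group_seats.2 ∧ pvDiffWitnessOut_group_seats.1 ≠ pvDiffWitnessOut_group_seats.2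
def Claim_exact_group_seats : Prop := ∀ (lst : List (List Int)) (n : Int), Dom_group_seats lst n → Pre_group_seats lst n → D_group_seats lst n → group_seats lst n ≠ group_seats_alt lst n

-- ===== LEMMAS AND PROOFS =====

-- ---- common spec: C n s = number of positions where n consecutive empty seats start ----
def C (n : Int) : List Int → Int
  | [] => 0
  | x :: s => (if n ≤ ((x :: s).length : Int) ∧ ∀ y ∈ (x :: s).take n.toNat, y = 0 then 1 else 0) + C n s

-- ---- B side ----
def payI (n r : Int) : Int := if n ≤ r then r - n + 1 else 0

def H (n : Int) : List Int → Int → Int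
  | [], r => payI n r
  | x :: s, r => if x = 0 then H n s (r + 1) else payI n r + H n s 0

def stepB (n : Int) (tr : Int × Int) (x : Int) : Int × Int :=
  if x = 0 then (tr.1, tr.2 + 1)
  else if n ≤ tr.2 then (tr.1 + tr.2 - n + 1, 0) else (tr.1, 0)

def finB (n : Int) (st : Int × Int) : Int := if n ≤ st.2 then st.1 + st.2 - n + 1 else st.1

theorem foldB_eq (n : Int) : ∀ (s : List Int) (t r : Int),
    finB n (s.foldl (stepB n) (t, r)) = t + H n s r := by
  intro s
  induction s with
  | nil => intro t r; simp [finB, H, payI]; split_ifs <;> ring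
  | cons x s ih =>
    intro t r
    by_cases hx : x = 0
    · simp [List.foldl_cons, stepB, hx, H, ih]
    · simp only [List.foldl_cons, stepB, if_neg hx, H, payI]
      by_cases hr : n ≤ r
      · rw [if_pos hr, if_pos hr, ih]; ring
      · rw [if_neg hr, if_neg hr, ih]; ring

theorem C_replicate (n : Int) (hn : 1 ≤ n) : ∀ k : Nat, C n (List.replicate k 0) = payI n k := by
  intro k
  induction k with
  | zero => simp [C, payI]; omega
  | succ k ih =>
    rw [List.replicate_succ, C, ih]
    have hall : ∀ y ∈ (((0:Int) :: List.replicate k 0).take n.toNat), y = 0 := by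
      intro y hy
      exact List.eq_of_mem_replicate (n := k + 1)
        (by simpa [List.replicate_succ] using List.mem_of_mem_take hy)
    by_cases h : n ≤ ((k : Int) + 1)
    · rw [if_pos ⟨by simpa using h, hall⟩]
      simp only [payI]; split_ifs <;> omega
    · rw [if_neg (fun hc => h (by simpa using hc.1))]
      simp only [payI]; split_ifs <;> omega

theorem C_block (n : Int) (hn : 1 ≤ n) (x : Int) (hx : x ≠ 0) (s : List Int) :
    ∀ k : Nat, C n (List.replicate k 0 ++ x :: s) = payI n k + C n s := by
  intro k
  induction k with
  | zero =>
    simp only [List.replicate, List.nil_append, C, payI]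
    have hw : ¬ (n ≤ ((x :: s).length : Int) ∧ ∀ y ∈ (x :: s).take n.toNat, y = 0) := by
      rintro ⟨-, h2⟩
      obtain ⟨m, hm⟩ : ∃ m, n.toNat = m + 1 := ⟨n.toNat - 1, by omega⟩
      exact hx (h2 x (by rw [hm, List.take_succ_cons]; exact List.mem_cons_self))
    rw [if_neg hw, if_neg (by omega)]
  | succ k ih =>
    rw [List.replicate_succ, List.cons_append, C, ih]
    have hcond : (n ≤ (((0:Int) :: (List.replicate k 0 ++ x :: s)).length : Int) ∧
        ∀ y ∈ ((0:Int) :: (List.replicate k 0 ++ x :: s)).take n.toNat, y = 0) ↔ n ≤ (k : Int) + 1 := by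
      constructor
      · rintro ⟨h1, h2⟩
        by_contra hgt
        have hge : k + 2 ≤ n.toNat := by omega
        have hrep : ((0:Int) :: (List.replicate k 0 ++ x :: s)) = List.replicate (k+1) 0 ++ x :: s := by
          simp [List.replicate_succ]
        have hxmem : x ∈ ((0:Int) :: (List.replicate k 0 ++ x :: s)).take n.toNat := by
          rw [hrep, List.take_append]
          refine List.mem_append_right _ ?_
          obtain ⟨m, hm⟩ : ∃ m, n.toNat - (List.replicate (k+1) (0:Int)).length = m + 1 :=
            ⟨n.toNat - (k+1) - 1, by simp only [List.length_replicate]; omega⟩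
          rw [hm, List.take_succ_cons]; exact List.mem_cons_self
        exact hx (h2 x hxmem)
      · intro hle
        constructor
        · simp only [List.length_cons, List.length_append, List.length_replicate]
          push_cast; omega
        · intro y hy
          have hrep : ((0:Int) :: (List.replicate k 0 ++ x :: s)) = List.replicate (k+1) 0 ++ x :: s := by
            simp [List.replicate_succ]
          rw [hrep, List.take_append_of_le_length (by simp; omega)] at hy
          exact List.eq_of_mem_replicate (List.mem_of_mem_take hy)
    by_cases h : n ≤ (k : Int) + 1
    · rw [if_pos (hcond.mpr h)]; simp only [payI]; split_ifs <;> omega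
    · rw [if_neg (fun hc => h (hcond.mp hc))]; simp only [payI]; split_ifs <;> omega

theorem H_eq_C (n : Int) (hn : 1 ≤ n) : ∀ (s : List Int) (k : Nat),
    H n s (k : Int) = C n (List.replicate k 0 ++ s) := by
  intro s
  induction s with
  | nil => intro k; simp only [H, List.append_nil]; exact (C_replicate n hn k).symm
  | cons x s ih =>
    intro k
    by_cases hx : x = 0
    · subst hx
      have h1 : H n ((0:Int) :: s) (k : Int) = H n s ((k:Int) + 1) := by simp [H]
      rw [h1, show ((k:Int) + 1) = ((k + 1 : Nat) : Int) by push_cast; ring, ih (k+1),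
        List.replicate_succ', List.append_assoc]
      rfl
    · have h1 : H n (x :: s) (k : Int) = payI n k + H n s 0 := by simp [H, hx]
      rw [h1, show (0:Int) = ((0:Nat):Int) by norm_num, ih 0]
      simp only [List.replicate, List.nil_append]
      exact (C_block n hn x hx s k).symm

theorem alt_eq_C (lst : List (List Int)) (n : Int) (hn : 1 ≤ n) :
    group_seats_alt lst n = C n lst.flatten := by
  have h : group_seats_alt lst n = finB n (lst.flatten.foldl (stepB n) ((0:Int), (0:Int))) := by
    rw [List.foldl_flatten]; rfl
  rw [h, foldB_eq n lst.flatten 0 0, show (0:Int) = ((0:Nat):Int) by norm_num,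
    H_eq_C n hn lst.flatten 0]
  simp [List.replicate]

-- ---- A side ----
def Zf (c : Int) : List Int → List Int
  | [] => []
  | x :: s => if x = 0 then c :: Zf (c + 1) s else Zf (c + 1) s

def consecB : List Int → Bool
  | a :: b :: r => (b == a + 1) && consecB (b :: r)
  | _ => true

def chkA (t : List Int) : Bool :=
  (PySem.List.enumerate (PySem.List.slice t none (some (-1)))).all
    (fun q => (PySem.List.pyGetD t q.1 0 + 1 == PySem.List.pyGetD t (q.1 + 1) 0)
      || (PySem.List.pyGetD t (q.1 + 1) 0 - 1 == PySem.List.pyGetD t q.1 0))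

def Acount (n : Int) (zs : List Int) : Int :=
  (PySem.List.enumerate (PySem.List.slice zs none (some (-n + 1)))).foldl
    (fun avail_seats p => if chkA (PySem.List.slice zs (some p.1) (some (p.1 + n)))
      then avail_seats + 1 else avail_seats)
    0

def WA (n : Int) : List Int → Int
  | [] => 0
  | z :: zs => (if n.toNat ≤ (z :: zs).length ∧ consecB ((z :: zs).take n.toNat) = true then 1 else 0) + WA n zs

def countIdx (g : Int → Bool) : Int → Nat → Int
  | _, 0 => 0
  | k, (L+1) => (if g k then 1 else 0) + countIdx g (k + 1) L

theorem Zf_eq (s : List Int) : ∀ c : Int,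
    (PySem.List.enumerate s c).filterMap (fun p => if p.2 = 0 then some p.1 else none) = Zf c s := by
  induction s with
  | nil => intro c; rfl
  | cons x s ih =>
    intro c
    by_cases hx : x = 0 <;>
      simp [PySem.List.enumerate, hx, Zf, ih]

theorem mem_Zf (s : List Int) : ∀ (c z : Int), z ∈ Zf c s → c ≤ z := by
  induction s with
  | nil => intro c z h; simp [Zf] at h
  | cons x s ih =>
    intro c z h
    by_cases hx : x = 0
    · rw [Zf, if_pos hx] at h
      rcases List.mem_cons.mp h with h | h
      · omega
      · have := ih (c+1) z h; omega
    · rw [Zf, if_neg hx] at h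
      have := ih (c+1) z h; omega

theorem Zf_shift (s : List Int) : ∀ (c d : Int), Zf (c + d) s = (Zf c s).map (· + d) := by
  induction s with
  | nil => intro c d; rfl
  | cons x s ih =>
    intro c d
    by_cases hx : x = 0
    · simp only [Zf, if_pos hx, List.map_cons]
      rw [show c + d + 1 = (c + 1) + d by ring, ih (c+1) d]
    · simp only [Zf, if_neg hx]
      rw [show c + d + 1 = (c + 1) + d by ring, ih (c+1) d]

theorem consecB_map_add (d : Int) : ∀ u : List Int, consecB (u.map (· + d)) = consecB u := by
  intro u
  induction u with
  | nil => rfl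
  | cons a u ih =>
    cases u with
    | nil => rfl
    | cons b r =>
      simp only [List.map_cons, consecB] at *
      rw [ih]
      congr 1
      rw [Bool.eq_iff_iff, beq_iff_eq, beq_iff_eq]; omega

theorem forall_mem_enumerate {α : Type} (g : Int → Bool) : ∀ (l : List α) (k : Int),
    (∀ q ∈ PySem.List.enumerate l k, g q.1 = true) ↔ ∀ j : Nat, j < l.length → g (k + (j : Int)) = true := by
  intro l
  induction l with
  | nil => intro k; simp [PySem.List.enumerate]
  | cons x l ih =>
    intro k
    simp only [PySem.List.enumerate, List.mem_cons, List.length_cons]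
    constructor
    · intro h j hj
      cases j with
      | zero => simpa using h (k, x) (Or.inl rfl)
      | succ j =>
        have h' := (ih (k+1)).mp (fun q hq => h q (Or.inr hq)) j (by omega)
        rw [show k + ((j + 1 : Nat) : Int) = k + 1 + (j : Int) by push_cast; ring]
        exact h'
    · intro h q hq
      rcases hq with hq | hq
      · subst hq; simpa using h 0 (by omega)
      · refine (ih (k+1)).mpr ?_ q hq
        intro j hj
        have h' := h (j+1) (by omega)
        rw [show k + 1 + (j : Int) = k + ((j + 1 : Nat) : Int) by push_cast; ring]
        exact h'

theorem consecB_iff : ∀ t : List Int, consecB t = true ↔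
    ∀ j : Nat, j + 1 < t.length → t.getD (j+1) 0 = t.getD j 0 + 1 := by
  intro t
  induction t with
  | nil => simp [consecB]
  | cons a t ih =>
    cases t with
    | nil => simp [consecB]
    | cons b r =>
      rw [consecB, Bool.and_eq_true, beq_iff_eq, ih]
      constructor
      · rintro ⟨h1, h2⟩ j hj
        cases j with
        | zero => simpa using h1
        | succ j => simpa using h2 j (by simpa using hj)
      · intro h
        refine ⟨by simpa using h 0 (by simp), ?_⟩
        intro j hj
        simpa using h (j+1) (by simpa using hj)

theorem chkA_eq (t : List Int) : chkA t = consecB t := by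
  rw [Bool.eq_iff_iff, consecB_iff, chkA, List.all_eq_true]
  rw [forall_mem_enumerate (fun i => (PySem.List.pyGetD t i 0 + 1 == PySem.List.pyGetD t (i + 1) 0)
      || (PySem.List.pyGetD t (i + 1) 0 - 1 == PySem.List.pyGetD t i 0)) _ 0]
  rw [PySem.List.slice_to_neg_one, List.length_dropLast]
  constructor
  · intro h j hj
    have := h j (by omega)
    rw [zero_add, show ((j:Int) + 1) = ((j + 1 : Nat) : Int) by push_cast; ring,
      PySem.List.pyGetD_natCast, PySem.List.pyGetD_natCast] at this
    simp only [Bool.or_eq_true, beq_iff_eq] at this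
    omega
  · intro h j hj
    have := h j (by omega)
    rw [zero_add, show ((j:Int) + 1) = ((j + 1 : Nat) : Int) by push_cast; ring,
      PySem.List.pyGetD_natCast, PySem.List.pyGetD_natCast]
    simp only [Bool.or_eq_true, beq_iff_eq]
    omega

theorem countIdx_shift (g : Int → Bool) : ∀ (L : Nat) (k : Int),
    countIdx g (k + 1) L = countIdx (fun i => g (i + 1)) k L := by
  intro L
  induction L with
  | zero => intro k; rfl
  | succ L ih => intro k; simp only [countIdx, ih (k+1)]

theorem countIdx_congr (g g' : Int → Bool) (h : ∀ i : Int, 0 ≤ i → g i = g' i) :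
    ∀ (L : Nat) (k : Int), 0 ≤ k → countIdx g k L = countIdx g' k L := by
  intro L
  induction L with
  | zero => intro k _; rfl
  | succ L ih => intro k hk; simp only [countIdx, h k hk, ih (k+1) (by omega)]

theorem countP_enum {α : Type} (g : Int → Bool) : ∀ (l : List α) (k : Int),
    ((PySem.List.enumerate l k).countP (fun q => g q.1) : Int) = countIdx g k l.length := by
  intro l
  induction l with
  | nil => intro k; rfl
  | cons x l ih =>
    intro k
    rw [PySem.List.enumerate, List.countP_cons, List.length_cons]
    simp only [countIdx]
    rw [← ih (k+1)]
    push_cast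
    split_ifs <;> ring

theorem countIdx_WA (n : Int) (hn : 2 ≤ n) : ∀ zs : List Int,
    countIdx (fun i => chkA (PySem.List.slice zs (some i) (some (i + n)))) 0
      (zs.length - (n.toNat - 1)) = WA n zs := by
  intro zs
  induction zs with
  | nil => rw [List.length_nil, Nat.zero_sub]; rfl
  | cons z t ih =>
    rcases Nat.eq_zero_or_pos ((z :: t).length - (n.toNat - 1)) with hL | hL
    · rw [hL]
      have hL' : t.length + 1 - (n.toNat - 1) = 0 := by simpa using hL
      have ht0 : t.length - (n.toNat - 1) = 0 := by omega
      rw [WA, if_neg (by rintro ⟨h1, -⟩; simp only [List.length_cons] at h1; omega), ← ih, ht0]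
      rfl
    · obtain ⟨M, hM⟩ : ∃ M, (z :: t).length - (n.toNat - 1) = M + 1 := ⟨(z :: t).length - (n.toNat - 1) - 1, by omega⟩
      have hM' : t.length + 1 - (n.toNat - 1) = M + 1 := by simpa using hM
      have hnt : n.toNat ≤ (z :: t).length := by simp only [List.length_cons]; omega
      have htM : t.length - (n.toNat - 1) = M := by omega
      rw [hM]
      simp only [countIdx]
      have hshift : countIdx (fun i => chkA (PySem.List.slice (z :: t) (some i) (some (i + n)))) (0 + 1) M
          = countIdx (fun i => chkA (PySem.List.slice t (some i) (some (i + n)))) 0 M := by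
        rw [countIdx_shift]
        refine countIdx_congr _ _ ?_ M 0 le_rfl
        intro i hi
        have hsl : PySem.List.slice (z :: t) (some (i+1)) (some ((i+1) + n))
            = PySem.List.slice t (some i) (some (i + n)) := by
          rw [PySem.List.slice_toNat (z :: t) (a := i + 1) (b := i + 1 + n) (by omega) (by omega),
            PySem.List.slice_toNat t (a := i) (b := i + n) (by omega) (by omega)]
          rw [show (i + 1).toNat = i.toNat + 1 by omega, List.drop_succ_cons]
          congr 1
          omega
        simp only [hsl]
      rw [hshift, show M = t.length - (n.toNat - 1) from htM.symm, ih]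
      have hhead : PySem.List.slice (z :: t) (some 0) (some (0 + n)) = (z :: t).take n.toNat := by
        rw [PySem.List.slice_toNat (z :: t) (a := 0) (b := 0 + n) le_rfl (by omega)]
        simp
      simp only [hhead, chkA_eq]
      rw [WA]
      by_cases hc : consecB ((z :: t).take n.toNat) = true
      · rw [if_pos hc, if_pos ⟨hnt, hc⟩]
      · rw [if_neg hc, if_neg (by rintro ⟨-, h⟩; exact hc h)]

theorem Acount_eq (n : Int) (hn : 2 ≤ n) (zs : List Int) : Acount n zs = WA n zs := by
  have hneg : (-n + 1) = -((n.toNat - 1 : Nat) : Int) := by omega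
  rw [Acount, hneg, PySem.List.slice_to_neg_natCast _ _ (by omega)]
  rw [PySem.List.foldl_count_if (fun q : Int × Int => chkA (PySem.List.slice zs (some q.1) (some (q.1 + n))))]
  rw [zero_add, countP_enum (fun i => chkA (PySem.List.slice zs (some i) (some (i + n))))]
  rw [List.length_take, Nat.min_eq_left (Nat.sub_le _ _)]
  exact countIdx_WA n hn zs

theorem WA_shift (n : Int) (d : Int) : ∀ zs : List Int, WA n (zs.map (· + d)) = WA n zs := by
  intro zs
  induction zs with
  | nil => rfl
  | cons z t ih =>
    simp only [List.map_cons, WA, ih]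
    congr 1
    rw [show ((z + d) :: t.map (· + d)) = (z :: t).map (· + d) by simp]
    rw [List.length_map, ← List.map_take, consecB_map_add]

theorem main_prefix (n : Int) : ∀ (s : List Int) (c : Int) (k : Nat),
    (k ≤ (Zf c s).length ∧ consecB ((c - 1) :: (Zf c s).take k) = true) ↔
    (k ≤ s.length ∧ ∀ y ∈ s.take k, y = 0) := by
  intro s
  induction s with
  | nil =>
    intro c k
    simp [Zf, consecB]
  | cons x s ih =>
    intro c k
    by_cases hx : x = 0
    · rw [Zf, if_pos hx]
      cases k with
      | zero => simp [consecB]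
      | succ k =>
        subst hx
        rw [List.take_succ_cons, List.take_succ_cons, List.length_cons, List.length_cons]
        have h1 : consecB ((c - 1) :: c :: (Zf (c+1) s).take k) = true ↔
            consecB (((c+1) - 1) :: (Zf (c+1) s).take k) = true := by
          rw [consecB, Bool.and_eq_true, beq_iff_eq]
          constructor
          · rintro ⟨-, h⟩; convert h using 3; ring
          · intro h; exact ⟨by ring, by convert h using 3; ring⟩
        have h2 := ih (c+1) k
        constructor
        · rintro ⟨ha, hb⟩
          have h3 := h2.mp ⟨by omega, h1.mp hb⟩
          refine ⟨by omega, ?_⟩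
          intro y hy
          rcases List.mem_cons.mp hy with h | h
          · exact h
          · exact h3.2 y h
        · rintro ⟨ha, hb⟩
          have hz : ∀ y ∈ List.take k s, y = 0 := fun y hy => hb y (List.mem_cons_of_mem _ hy)
          have h3 := h2.mpr ⟨by omega, hz⟩
          exact ⟨by omega, h1.mpr h3.2⟩
    · rw [Zf, if_neg hx]
      cases k with
      | zero => simp [consecB]
      | succ k =>
        constructor
        · rintro ⟨h1, h2⟩
          exfalso
          obtain ⟨w, rest, hw⟩ : ∃ w rest, Zf (c+1) s = w :: rest := by
            cases hz : Zf (c+1) s with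
            | nil => rw [hz] at h1; simp at h1
            | cons w rest => exact ⟨w, rest, rfl⟩
          rw [hw, List.take_succ_cons, consecB, Bool.and_eq_true, beq_iff_eq] at h2
          have hmem : w ∈ Zf (c+1) s := by rw [hw]; exact List.mem_cons_self
          have := mem_Zf s (c+1) w hmem
          omega
        · rintro ⟨h1, h2⟩
          exact absurd (h2 x (by rw [List.take_succ_cons]; exact List.mem_cons_self)) hx

theorem WA_C (n : Int) (hn : 2 ≤ n) : ∀ s : List Int, WA n (Zf 0 s) = C n s := by
  intro s
  induction s with
  | nil => rfl
  | cons x s ih =>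
    have hZ1 : Zf 1 s = (Zf 0 s).map (· + 1) := by
      have := Zf_shift s 0 1; simpa using this
    by_cases hx : x = 0
    · rw [Zf, if_pos hx, zero_add, WA, hZ1, WA_shift, ih, C]
      congr 1
      have hiff : (n.toNat ≤ ((0:Int) :: (Zf 0 s).map (· + 1)).length ∧
          consecB (((0:Int) :: (Zf 0 s).map (· + 1)).take n.toNat) = true) ↔
          (n ≤ ((x :: s).length : Int) ∧ ∀ y ∈ (x :: s).take n.toNat, y = 0) := by
        have hz0 : ((0:Int) :: (Zf 0 s).map (· + 1)) = Zf 0 (x :: s) := by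
          rw [Zf, if_pos hx, zero_add, hZ1]
        rw [hz0]
        have h2 : (n.toNat ≤ (Zf 0 (x :: s)).length ∧ consecB ((Zf 0 (x :: s)).take n.toNat) = true) ↔
            (n.toNat ≤ (Zf 0 (x :: s)).length ∧ consecB (((0:Int) - 1) :: (Zf 0 (x :: s)).take n.toNat) = true) := by
          constructor
          · rintro ⟨h1, hcB⟩
            refine ⟨h1, ?_⟩
            obtain ⟨m, hm⟩ : ∃ m, n.toNat = m + 1 := ⟨n.toNat - 1, by omega⟩
            rw [Zf, if_pos hx, zero_add, hm, List.take_succ_cons] at hcB ⊢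
            rw [consecB, Bool.and_eq_true, beq_iff_eq]
            exact ⟨by ring, hcB⟩
          · rintro ⟨h1, hcB⟩
            refine ⟨h1, ?_⟩
            obtain ⟨m, hm⟩ : ∃ m, n.toNat = m + 1 := ⟨n.toNat - 1, by omega⟩
            rw [Zf, if_pos hx, zero_add, hm, List.take_succ_cons] at hcB ⊢
            rw [consecB, Bool.and_eq_true] at hcB
            exact hcB.2
        rw [h2, main_prefix n (x :: s) 0 n.toNat]
        simp only [List.length_cons]
        constructor
        · rintro ⟨h1, h2⟩; exact ⟨by omega, h2⟩
        · rintro ⟨h1, h2⟩; exact ⟨by omega, h2⟩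
      by_cases hC : (n ≤ ((x :: s).length : Int) ∧ ∀ y ∈ (x :: s).take n.toNat, y = 0)
      · rw [if_pos (hiff.mpr hC), if_pos hC]
      · rw [if_neg (fun hc => hC (hiff.mp hc)), if_neg hC]
    · rw [Zf, if_neg hx, zero_add, hZ1, WA_shift, ih, C]
      have hw : ¬ (n ≤ ((x :: s).length : Int) ∧ ∀ y ∈ (x :: s).take n.toNat, y = 0) := by
        rintro ⟨-, h2⟩
        obtain ⟨m, hm⟩ : ∃ m, n.toNat = m + 1 := ⟨n.toNat - 1, by omega⟩
        exact hx (h2 x (by rw [hm, List.take_succ_cons]; exact List.mem_cons_self))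
      rw [if_neg hw]
      ring

theorem portA_eq (lst : List (List Int)) (n : Int) :
    group_seats lst n = Acount n (Zf 0 lst.flatten) := by
  rw [group_seats, Acount]
  rw [show PySem.List.enumerate lst.flatten = PySem.List.enumerate lst.flatten 0 from rfl, Zf_eq]
  rfl

theorem portA_one (lst : List (List Int)) : group_seats lst 1 = 0 := by
  rw [portA_eq]
  rw [Acount, show (-(1:Int) + 1) = 0 by ring, PySem.List.slice_to _ le_rfl]
  rfl

theorem C_nonneg (n : Int) : ∀ s : List Int, 0 ≤ C n s := by
  intro s
  induction s with
  | nil => simp [C]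
  | cons x s ih => rw [C]; split_ifs <;> omega

theorem C_zero_of_no_zero (n : Int) (hn : 1 ≤ n) : ∀ s : List Int, (0:Int) ∉ s → C n s = 0 := by
  intro s
  induction s with
  | nil => intro _; rfl
  | cons x s ih =>
    intro h
    have hx : x ≠ 0 := fun hx => h (hx ▸ List.mem_cons_self)
    have hs : (0:Int) ∉ s := fun hs => h (List.mem_cons_of_mem _ hs)
    rw [C, ih hs, if_neg]
    · ring
    · rintro ⟨-, h2⟩
      obtain ⟨m, hm⟩ : ∃ m, n.toNat = m + 1 := ⟨n.toNat - 1, by omega⟩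
      exact hx (h2 x (by rw [hm, List.take_succ_cons]; exact List.mem_cons_self))

theorem C_pos_one : ∀ s : List Int, (0:Int) ∈ s → 1 ≤ C 1 s := by
  intro s
  induction s with
  | nil => intro h; simp at h
  | cons x s ih =>
    intro h
    by_cases hx : x = 0
    · rw [C, if_pos]
      · have := C_nonneg 1 s; omega
      · refine ⟨by simp only [List.length_cons]; omega, ?_⟩
        intro y hy
        rw [show (1:Int).toNat = 1 from rfl, List.take_succ_cons, List.take_zero] at hy
        have := List.mem_singleton.mp hy
        omega
    · have hs : (0:Int) ∈ s := by
        rcases List.mem_cons.mp h with h' | h'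
        · exact absurd h'.symm hx
        · exact h'
      rw [C]
      have := ih hs
      split_ifs <;> omega

-- ===== VERDICT (by name: the statement is the Claim_ definition above) =====
theorem group_seats_spec : Claim_unchanged_group_seats := by
  intro lst n _hdom hpre hnd
  by_cases h2 : 2 ≤ n
  · rw [portA_eq, Acount_eq n h2, WA_C n h2, alt_eq_C lst n (by omega)]
  · have hn1 : n = 1 := by unfold Pre_group_seats at hpre; omega
    subst hn1
    have hz : (0:Int) ∉ lst.flatten := by
      intro hmem
      rcases List.mem_flatten.mp hmem with ⟨row, hrow, h0⟩
      exact hnd ⟨rfl, List.any_eq_true.mpr ⟨row, hrow, List.any_eq_true.mpr ⟨0, h0, rfl⟩⟩⟩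
    rw [portA_one, alt_eq_C lst 1 le_rfl, C_zero_of_no_zero 1 le_rfl lst.flatten hz]

theorem group_seats_changed : Claim_changed_group_seats := by
  unfold Claim_changed_group_seats; decide

theorem group_seats_tight : Claim_exact_group_seats := by
  intro lst n _hdom _hpre hD
  obtain ⟨hn1, hany⟩ := hD
  subst hn1
  obtain ⟨row, hrow, hrow0⟩ := List.any_eq_true.mp hany
  obtain ⟨x, hx0, hxeq⟩ := List.any_eq_true.mp hrow0
  have hz : (0:Int) ∈ lst.flatten :=
    List.mem_flatten.mpr ⟨row, hrow, by rwa [show x = 0 from by simpa using hxeq] at hx0⟩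
  rw [portA_one, alt_eq_C lst 1 le_rfl]
  have := C_pos_one lst.flatten hz
  omega
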